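-- pv_equiv track=rewrite | github.com/miliar/Code_Jam_Webscraper | Solutions_python/Problem_123/471.py | cumsumd
-- ===== SOURCE A (Python) =====
-- def cumsumd(L):
-- 	Lnew = [0]
-- 	diff = [L[0]]
-- 	s = 0
-- 	i = 0
-- 	for elem in L[:-1]:
-- 		i += 1
-- 		s += elem
-- 		Lnew.append(s)
-- 		diff.append(L[i]-s)
--
-- 	return (Lnew,diff)
-- ===== SOURCE B (Python) =====
-- def cumsumd(L):
--     P = []
--     s = 0
--     for x in L:
--         s += x
--         P.append(s)
--     Lnew = [0] + P[:-1]
--     diff = [x - p for x, p in zip(L, Lnew)]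
--     return (Lnew, diff)
-- ===== Notes on version B (the rewrite author's own statement) =====
-- stated objective: simpler
-- what changed: B first builds the full prefix-sum list, takes [0]+P[:-1] as Lnew, and computes diff by zipping L with Lnew, removing A's index counter and per-step indexing L[i]; B returns ([0],[]) on the empty list where A raises IndexError.
-- outside the precondition, e.g. on cumsumd([]): A raises IndexError, B returns ([0], [])
-- crash fix: On the empty list A raises IndexError (it accesses L[0]); B returns ([0], []). — e.g. on cumsumd([]): A raises IndexError, B returns ([0], [])
import Mathlib
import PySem

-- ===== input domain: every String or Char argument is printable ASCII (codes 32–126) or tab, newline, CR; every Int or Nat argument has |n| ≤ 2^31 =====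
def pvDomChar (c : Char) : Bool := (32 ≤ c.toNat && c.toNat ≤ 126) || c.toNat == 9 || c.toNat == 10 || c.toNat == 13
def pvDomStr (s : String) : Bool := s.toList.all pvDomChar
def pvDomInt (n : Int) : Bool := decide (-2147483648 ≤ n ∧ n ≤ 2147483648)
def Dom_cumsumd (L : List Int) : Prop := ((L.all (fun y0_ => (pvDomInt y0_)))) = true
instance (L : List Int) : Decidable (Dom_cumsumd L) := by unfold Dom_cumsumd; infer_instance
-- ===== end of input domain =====

-- B replaces A's indexed counter loop by prefix sums + slice + zip (objective: simpler, same cost).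

-- ===== PORT A =====
-- literal port of A: diff starts as [L[0]] (Pre_ excludes L = [], where Python raises IndexError),
-- then one loop over L[:-1] maintaining counter i, running sum s, and both output lists.
def cumsumd (L : List Int) : List Int × List Int :=
  let d0 := (PySem.List.pyGet? L 0).getD 0
  let st := (PySem.List.slice L none (some (-1))).foldl
    (fun (st : Int × Int × List Int × List Int) elem =>
      let i := st.1 + 1
      let s := st.2.1 + elem
      (i, s, st.2.2.1 ++ [s], st.2.2.2 ++ [(PySem.List.pyGet? L i).getD 0 - s]))
    (0, 0, [0], [d0])
  (st.2.2.1, st.2.2.2)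

-- ===== PORT B =====
def cumsumd_alt (L : List Int) : List Int × List Int :=
  let P := (L.foldl (fun (st : Int × List Int) x => (st.1 + x, st.2 ++ [st.1 + x])) (0, [])).2
  let Lnew := [0] ++ PySem.List.slice P none (some (-1))
  let diff := (L.zip Lnew).map (fun xp => xp.1 - xp.2)
  (Lnew, diff)

-- ===== PRECONDITION & SPEC =====
-- Pre_ excludes only the empty list, on which Python A raises IndexError at L[0].
def Pre_cumsumd (L : List Int) : Prop := L ≠ []
instance (L : List Int) : Decidable (Pre_cumsumd L) := by unfold Pre_cumsumd; infer_instance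
def pvWitness_cumsumd : List Int := [1, 2, 3]

-- On the empty list A raises IndexError (it accesses L[0]); B returns ([0], []).
def Raises_cumsumd (L : List Int) : Prop := L = []
instance (L : List Int) : Decidable (Raises_cumsumd L) := by unfold Raises_cumsumd; infer_instance
def pvRaiseWitness_cumsumd : List Int := []
def pvRaiseWitnessOut_cumsumd : List Int × List Int := ([0], [])

def Spec_cumsumd (L : List Int) (out : List Int × List Int) : Prop := out = cumsumd_alt L
instance (L : List Int) (out : List Int × List Int) : Decidable (Spec_cumsumd L out) := by unfold Spec_cumsumd; infer_instance

-- ===== CLAIM (what is proved, stated in full; the proofs are below) =====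
def Claim_equal_cumsumd : Prop := ∀ (L : List Int), Dom_cumsumd L → Pre_cumsumd L → Spec_cumsumd L (cumsumd L)
def Claim_raises_cumsumd : Prop := (∀ (L : List Int), Dom_cumsumd L → Raises_cumsumd L → ¬ Pre_cumsumd L) ∧ (Dom_cumsumd (pvRaiseWitness_cumsumd) ∧ Raises_cumsumd (pvRaiseWitness_cumsumd) ∧ cumsumd_alt (pvRaiseWitness_cumsumd) = pvRaiseWitnessOut_cumsumd)

-- ===== LEMMAS AND PROOFS =====

-- prefix sums starting from accumulator s
def pvPrefixes (s : Int) (xs : List Int) : List Int :=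
  match xs with
  | [] => []
  | x :: t => (s + x) :: pvPrefixes (s + x) t

-- the diff entries A's loop appends, starting at counter i with running sum s
def pvDiffs (L : List Int) (i s : Int) (ys : List Int) : List Int :=
  match ys with
  | [] => []
  | y :: t => ((PySem.List.pyGet? L (i + 1)).getD 0 - (s + y)) :: pvDiffs L (i + 1) (s + y) t

theorem pvBfold (xs : List Int) : ∀ (s : Int) (acc : List Int),
    xs.foldl (fun (st : Int × List Int) x => (st.1 + x, st.2 ++ [st.1 + x])) (s, acc)
      = (s + xs.sum, acc ++ pvPrefixes s xs) := by
  induction xs with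
  | nil => simp [pvPrefixes]
  | cons x t ih =>
    intro s acc
    simp only [List.foldl_cons, ih, pvPrefixes, List.sum_cons, List.append_assoc,
      List.singleton_append, Prod.mk.injEq, and_true]
    ring

theorem pvAfold (L : List Int) (ys : List Int) : ∀ (i s : Int) (a1 a2 : List Int),
    ys.foldl
      (fun (st : Int × Int × List Int × List Int) elem =>
        let i := st.1 + 1
        let s := st.2.1 + elem
        (i, s, st.2.2.1 ++ [s], st.2.2.2 ++ [(PySem.List.pyGet? L i).getD 0 - s]))
      (i, s, a1, a2)
      = (i + ys.length, s + ys.sum, a1 ++ pvPrefixes s ys, a2 ++ pvDiffs L i s ys) := by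
  induction ys with
  | nil => simp [pvPrefixes, pvDiffs]
  | cons y t ih =>
    intro i s a1 a2
    simp only [List.foldl_cons, ih, pvPrefixes, pvDiffs, List.length_cons, List.sum_cons,
      List.append_assoc, List.singleton_append, Prod.mk.injEq, and_true]
    exact ⟨by push_cast; ring, by ring⟩

theorem pvPrefixes_dropLast (xs : List Int) : ∀ (s : Int),
    pvPrefixes s xs.dropLast = (pvPrefixes s xs).dropLast := by
  induction xs with
  | nil => intro s; simp [pvPrefixes]
  | cons x t ih =>
    intro s
    cases t with
    | nil => simp [pvPrefixes]
    | cons y u =>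
      rw [List.dropLast_cons₂]
      show (s + x) :: pvPrefixes (s + x) (y :: u).dropLast = _
      rw [ih]
      show _ = ((s + x) :: pvPrefixes (s + x) (y :: u)).dropLast
      rw [List.dropLast_cons_of_ne_nil (by simp [pvPrefixes])]

theorem pvDiffs_zip (L : List Int) : ∀ (ys zs : List Int) (s : Int) (i : Nat),
    L.drop (i + 1) = zs → ys.length ≤ zs.length →
    pvDiffs L (i : Int) s ys = List.zipWith (fun a b => a - b) zs (pvPrefixes s ys) := by
  intro ys
  induction ys with
  | nil => intro zs s i _ _; simp [pvDiffs, pvPrefixes]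
  | cons y t ih =>
    intro zs s i hdrop hlen
    cases zs with
    | nil => simp at hlen
    | cons z zt =>
      have hgetn : L[(i + 1 : Nat)]? = some z := by
        have h : (List.drop (i + 1) L)[0]? = some z := by rw [hdrop]; rfl
        rwa [List.getElem?_drop, Nat.add_zero] at h
      have hget : PySem.List.pyGet? L ((i : Int) + 1) = some z := by
        have hcast : ((i : Int) + 1) = ((i + 1 : Nat) : Int) := by push_cast; ring
        rw [hcast, PySem.List.pyGet?_natCast]
        exact hgetn
      have hdrop' : L.drop (i + 1 + 1) = zt := by
        have h : (L.drop (i + 1)).drop 1 = zt := by rw [hdrop]; rfl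
        rw [List.drop_drop] at h
        convert h using 2
      have ihh := ih zt (s + y) (i + 1) hdrop' (by simpa using Nat.le_of_succ_le_succ hlen)
      have hc : ((i + 1 : Nat) : Int) = (i : Int) + 1 := by push_cast; ring
      rw [hc] at ihh
      simp only [pvDiffs, pvPrefixes, List.zipWith_cons_cons, hget, Option.getD_some, ihh]

theorem pvZipMapSub (as : List Int) : ∀ (bs : List Int),
    (as.zip bs).map (fun xp => xp.1 - xp.2) = List.zipWith (fun a b => a - b) as bs := by
  induction as with
  | nil => intro bs; simp
  | cons a t ih => intro bs; cases bs with
    | nil => simp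
    | cons b bt => simp [ih]

-- ===== VERDICT (by name: the statement is the Claim_ definition above) =====
theorem cumsumd_spec : Claim_equal_cumsumd := by
  intro L _ hPre
  unfold Spec_cumsumd cumsumd cumsumd_alt
  cases L with
  | nil => exact absurd rfl hPre
  | cons x xs =>
    simp only [PySem.List.slice_to_neg_one, pvBfold, pvAfold, PySem.List.pyGet?_zero_cons,
      Option.getD_some, List.nil_append]
    rw [pvPrefixes_dropLast, pvZipMapSub]
    have hdiff : pvDiffs (x :: xs) 0 0 (x :: xs).dropLast
        = List.zipWith (fun a b => a - b) xs (pvPrefixes 0 (x :: xs).dropLast) := by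
      have h0 : ((0 : Nat) : Int) = (0 : Int) := rfl
      rw [← h0]
      exact pvDiffs_zip (x :: xs) (x :: xs).dropLast xs 0 0 (by simp)
        (by simp [List.length_dropLast])
    simp only [List.singleton_append, List.zipWith_cons_cons, Int.sub_zero]
    rw [hdiff, ← pvPrefixes_dropLast]

theorem cumsumd_raises : Claim_raises_cumsumd := by
  unfold Claim_raises_cumsumd
  exact ⟨fun L _ h => by simp [Pre_cumsumd, Raises_cumsumd] at h ⊢; exact h, by decide⟩

-- self-check that the crash-fix witness value proved in cumsumd_raises is B's value at the witness
theorem cumsumd_raises_ok : cumsumd_alt pvRaiseWitness_cumsumd = pvRaiseWitnessOut_cumsumd :=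
  cumsumd_raises.2.2.2
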